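-- pv_equiv track=rewrite | github.com/SebaB29/TeoriaDeAlgortimos | tp1/problema_4/problema_4.py | min_palindromos
-- ===== SOURCE A (Python) =====
-- def min_palindromos(cadena):  # O(n^2)
--     """
--     Calcula la cantidad mínima de palíndromos necesarios para descomponer la cadena S.
--     Utiliza programación dinámica con una matriz de precálculo para verificar palíndromos en O(1)
--     y un arreglo de optimización para determinar el número mínimo de cortes.
--     Equivale algorítmicamente a encontrar la partición más eficiente de la estructura de la cadena.
--     """
--     n = len(cadena)  # O(1)
--     if n == 0:  # O(1)
--         return 0  # O(1)
--
--     # Matriz de precálculo de palindromos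
--     es_palindromo = [[False for _ in range(n)] for _ in range(n)]  # O(n^2)
--
--     for i in range(n - 1, -1, -1):  # O(n)
--         for j in range(i, n):  # O(n)
--             if cadena[i] == cadena[j]:  # O(1)
--                 if j - i <= 2 or es_palindromo[i + 1][j - 1]:  # O(1)
--                     es_palindromo[i][j] = True  # O(1)
--
--     # Array con cantidades de cortes para formar grupos de palindromos
--     # EJEMPLO: ["C", "ASA"] -> 1 corte
--     # EJEMPLO: ["ARA", "CALAC", "ANA"] -> 2 cortes
--     cortes = [0] * n  # O(n)
--
--     for i in range(n):  # O(n)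
--
--         if es_palindromo[0][i]:  # O(1)
--             cortes[i] = 0  # O(1)
--
--         else:  # O(1)
--             # Buscamos el mejor punto de corte 'j'
--             # Inicializamos con el peor caso: un corte por cada letra
--             cortes[i] = i  # O(1)
--             for j in range(i):  # O(n)
--                 if es_palindromo[j + 1][i]:  # O(1)
--                     cortes[i] = min(cortes[i], cortes[j] + 1)  # O(1)
--
--     # Como pide cantidad minima de palindromos -> cantidad minima de cortes + 1
--     return cortes[n - 1] + 1  # O(1)
-- ===== SOURCE B (Python) =====
-- def min_palindromos(cadena):
--     """Forward DP over prefix lengths: dp[i] = min palindromes covering cadena[:i],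
--     palindromicity checked directly by slice reversal (no precomputed matrix)."""
--     n = len(cadena)
--     if n == 0:
--         return 0
--     dp = [0] * (n + 1)
--     for i in range(1, n + 1):
--         mejor = dp[i - 1] + 1
--         for j in range(i - 1):
--             sub = cadena[j:i]
--             if sub == sub[::-1] and dp[j] + 1 < mejor:
--                 mejor = dp[j] + 1
--         dp[i] = mejor
--     return dp[n]
-- ===== Notes on version B (the rewrite author's own statement) =====
-- stated objective: simpler
-- what changed: Replaced the O(n^2) precomputed palindrome matrix plus a cuts array by a single forward DP over prefix lengths whose inner loop tests palindromicity directly by slice reversal, returning counts instead of cuts+1.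
import Mathlib
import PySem

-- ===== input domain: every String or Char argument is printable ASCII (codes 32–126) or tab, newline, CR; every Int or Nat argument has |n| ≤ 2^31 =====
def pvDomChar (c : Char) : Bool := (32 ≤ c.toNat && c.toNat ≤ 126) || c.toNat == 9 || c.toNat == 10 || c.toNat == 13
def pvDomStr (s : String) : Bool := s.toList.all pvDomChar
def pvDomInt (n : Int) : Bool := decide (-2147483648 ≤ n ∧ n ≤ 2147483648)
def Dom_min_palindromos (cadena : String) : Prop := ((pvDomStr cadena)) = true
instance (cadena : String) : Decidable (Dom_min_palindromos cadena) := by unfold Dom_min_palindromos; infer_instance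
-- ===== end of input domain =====

-- B replaces A's precomputed palindrome matrix + cuts array by a single forward DP over
-- prefix lengths with a direct slice-reversal palindrome test (simpler; not faster).

-- ===== PORT A =====
-- Literal port of A. String indexing cadena[i] (always in range in A) is List.getD on
-- cadena.toList; the 2D-list assignment es_palindromo[i][j] = True is List.set of a set row.
def min_palindromos (cadena : String) : Int :=
  let c := cadena.toList
  let n := c.length
  if n = 0 then 0
  else
    let esPal0 : List (List Bool) := List.replicate n (List.replicate n false)
    let esPal := ((List.range n).reverse).foldl (fun m i =>
      (List.range' i (n - i)).foldl (fun m j =>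
        if c.getD i ' ' = c.getD j ' ' then
          if j - i ≤ 2 || (m.getD (i+1) []).getD (j-1) false then
            m.set i ((m.getD i []).set j true)
          else m
        else m) m) esPal0
    let cortes := (List.range n).foldl (fun ct i =>
      if (esPal.getD 0 []).getD i false then ct.set i 0
      else
        let ct := ct.set i (i : Int)
        (List.range i).foldl (fun ct j =>
          if (esPal.getD (j+1) []).getD i false then
            ct.set i (min (ct.getD i 0) (ct.getD j 0 + 1))
          else ct) ct) (List.replicate n (0:Int))
    cortes.getD (n-1) 0 + 1

-- ===== PORT B =====
-- Literal port of Source B: cadena[j:i] with 0 ≤ j ≤ i ≤ n is (c.drop j).take (i - j).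
def min_palindromos_alt (cadena : String) : Int :=
  let c := cadena.toList
  let n := c.length
  if n = 0 then 0
  else
    let dp := (List.range' 1 n).foldl (fun dp i =>
      let mejor := (List.range (i-1)).foldl (fun mejor j =>
        let sub := (c.drop j).take (i - j)
        if sub = sub.reverse ∧ dp.getD j 0 + 1 < mejor then dp.getD j 0 + 1 else mejor)
        (dp.getD (i-1) 0 + 1)
      dp.set i mejor) (List.replicate (n+1) (0:Int))
    dp.getD n 0

-- ===== PRECONDITION & SPEC =====
def Spec_min_palindromos (cadena : String) (out : Int) : Prop := out = min_palindromos_alt cadena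
instance (cadena : String) (out : Int) : Decidable (Spec_min_palindromos cadena out) := by unfold Spec_min_palindromos; infer_instance

-- ===== CLAIM (what is proved, stated in full; the proofs are below) =====
def Claim_equal_min_palindromos : Prop := ∀ (cadena : String), Dom_min_palindromos cadena → Spec_min_palindromos cadena (min_palindromos cadena)

-- ===== LEMMAS AND PROOFS =====

-- A's recursive palindrome criterion on index range [i, j] (as A's matrix computes it).
def palB (c : List Char) (i j : Nat) : Bool :=
  if j - i ≤ 2 then c.getD i ' ' = c.getD j ' '
  else (c.getD i ' ' = c.getD j ' ') && palB c (i+1) (j-1)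
termination_by j - i

-- generic "min over qualifying indices below k, with a seed" fold
def mfold (p : Nat → Bool) (g : Nat → Int) (init : Int) (k : Nat) : Int :=
  (List.range k).foldl (fun acc j => if p j then min acc (g j) else acc) init

lemma le_mfold_iff (p : Nat → Bool) (g : Nat → Int) (init : Int) (k : Nat) (x : Int) :
    x ≤ mfold p g init k ↔ x ≤ init ∧ ∀ j < k, p j = true → x ≤ g j := by
  induction k with
  | zero => simp [mfold]
  | succ k ih =>
    simp only [mfold, List.range_succ, List.foldl_append, List.foldl_cons, List.foldl_nil]
    constructor
    · intro h
      by_cases hp : p k = true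
      · simp only [hp, if_true] at h
        have h' := (ih.mp (le_trans h (min_le_left _ _)))
        refine ⟨h'.1, ?_⟩
        intro j hj hpj
        rcases Nat.lt_succ_iff_lt_or_eq.mp hj with hj' | rfl
        · exact h'.2 j hj' hpj
        · exact le_trans h (min_le_right _ _)
      · simp only [hp] at h
        have h' := ih.mp h
        refine ⟨h'.1, ?_⟩
        intro j hj hpj
        rcases Nat.lt_succ_iff_lt_or_eq.mp hj with hj' | rfl
        · exact h'.2 j hj' hpj
        · exact absurd hpj hp
    · rintro ⟨h1, h2⟩
      by_cases hp : p k = true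
      · simp only [hp, if_true]
        exact le_min (ih.mpr ⟨h1, fun j hj hpj => h2 j (Nat.lt_succ_of_lt hj) hpj⟩)
          (h2 k (Nat.lt_succ_self k) hp)
      · simp only [hp]
        exact ih.mpr ⟨h1, fun j hj hpj => h2 j (Nat.lt_succ_of_lt hj) hpj⟩

lemma mfold_le_init (p : Nat → Bool) (g : Nat → Int) (init : Int) (k : Nat) :
    mfold p g init k ≤ init :=
  ((le_mfold_iff p g init k _).mp le_rfl).1

lemma mfold_le_g (p : Nat → Bool) (g : Nat → Int) (init : Int) (k : Nat)
    {j : Nat} (hj : j < k) (hp : p j = true) : mfold p g init k ≤ g j :=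
  ((le_mfold_iff p g init k _).mp le_rfl).2 j hj hp

lemma mfold_congr (p p' : Nat → Bool) (g g' : Nat → Int) (init : Int) (k : Nat)
    (hp : ∀ j < k, p j = p' j) (hg : ∀ j < k, g j = g' j) :
    mfold p g init k = mfold p' g' init k := by
  unfold mfold
  apply PySem.List.foldl_congr_mem
  intro acc j hj
  have hj' := List.mem_range.mp hj
  rw [hp j hj', hg j hj']

-- A's cortes values, as a list built left to right (entry k = cortes[k])
def CsL (c : List Char) : Nat → List Int
  | 0 => []
  | k+1 =>
    CsL c k ++ [ if palB c 0 k then 0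
                 else mfold (fun j => palB c (j+1) k) (fun j => (CsL c k).getD j 0 + 1) (k : Int) k ]

def Cs (c : List Char) (k : Nat) : Int := (CsL c (k+1)).getD k 0

-- B's dp values, as a list built left to right (entry k = dp[k])
def DsL (c : List Char) : Nat → List Int
  | 0 => [0]
  | k+1 =>
    DsL c k ++ [ (List.range k).foldl (fun mejor j =>
        if ((c.drop j).take (k+1-j) = ((c.drop j).take (k+1-j)).reverse) ∧ (DsL c k).getD j 0 + 1 < mejor
        then (DsL c k).getD j 0 + 1 else mejor)
        ((DsL c k).getD k 0 + 1) ]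

def Ds (c : List Char) (k : Nat) : Int := (DsL c k).getD k 0

lemma CsL_length (c : List Char) (k : Nat) : (CsL c k).length = k := by
  induction k with
  | zero => rfl
  | succ k ih => simp [CsL, ih]

lemma DsL_length (c : List Char) (k : Nat) : (DsL c k).length = k + 1 := by
  induction k with
  | zero => rfl
  | succ k ih => simp [DsL, ih]

lemma CsL_getD (c : List Char) (k j : Nat) (hj : j < k) : (CsL c k).getD j 0 = Cs c j := by
  induction k with
  | zero => omega
  | succ k ih =>
    rcases Nat.lt_succ_iff_lt_or_eq.mp hj with hj' | rfl
    · show (CsL c (k+1)).getD j 0 = Cs c j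
      rw [CsL]
      rw [List.getD_append _ _ _ _ (by rw [CsL_length]; exact hj')]
      exact ih hj'
    · rfl

lemma DsL_getD (c : List Char) (k j : Nat) (hj : j ≤ k) : (DsL c k).getD j 0 = Ds c j := by
  induction k with
  | zero => interval_cases j; rfl
  | succ k ih =>
    rcases Nat.lt_succ_iff_lt_or_eq.mp (Nat.lt_succ_of_le hj) with hj' | rfl
    · show (DsL c (k+1)).getD j 0 = Ds c j
      rw [DsL]
      rw [List.getD_append _ _ _ _ (by rw [DsL_length]; exact hj')]
      exact ih (Nat.lt_succ_iff.mp hj')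
    · rfl

-- closed recurrences
lemma Cs_eq (c : List Char) (k : Nat) :
    Cs c k = if palB c 0 k then 0
             else mfold (fun j => palB c (j+1) k) (fun j => Cs c j + 1) (k : Int) k := by
  show (CsL c (k+1)).getD k 0 = _
  rw [CsL, List.getD_append_right (CsL c k) _ 0 k (by rw [CsL_length])]
  simp only [CsL_length, Nat.sub_self, List.getD_cons_zero]
  split_ifs with h
  · rfl
  · exact mfold_congr _ _ _ _ _ _ (fun j hj => rfl)
      (fun j hj => by rw [CsL_getD c k j hj])

lemma Ds_zero (c : List Char) : Ds c 0 = 0 := rfl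

lemma Ds_succ_raw (c : List Char) (k : Nat) :
    Ds c (k+1) = (List.range k).foldl (fun mejor j =>
        if ((c.drop j).take (k+1-j) = ((c.drop j).take (k+1-j)).reverse) ∧ Ds c j + 1 < mejor
        then Ds c j + 1 else mejor)
        (Ds c k + 1) := by
  show (DsL c (k+1)).getD (k+1) 0 = _
  rw [DsL, List.getD_append_right (DsL c k) _ 0 (k+1) (by rw [DsL_length])]
  simp only [DsL_length, Nat.sub_self, List.getD_cons_zero]
  rw [DsL_getD c k k le_rfl]
  apply PySem.List.foldl_congr_mem
  intro mejor j hj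
  rw [DsL_getD c k j (Nat.le_of_lt (List.mem_range.mp hj))]

-- strict-update fold = min fold
lemma Ds_succ_mfold (c : List Char) (k : Nat) :
    Ds c (k+1) = mfold (fun j => decide (((c.drop j).take (k+1-j)) = ((c.drop j).take (k+1-j)).reverse))
        (fun j => Ds c j + 1) (Ds c k + 1) k := by
  rw [Ds_succ_raw]
  unfold mfold
  apply PySem.List.foldl_congr_mem
  intro acc j hj
  by_cases hp : ((c.drop j).take (k+1-j)) = ((c.drop j).take (k+1-j)).reverse
  · have hd : decide ((c.drop j).take (k+1-j) = ((c.drop j).take (k+1-j)).reverse) = true :=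
      decide_eq_true hp
    by_cases hlt : Ds c j + 1 < acc
    · rw [if_pos ⟨hp, hlt⟩, if_pos hd, min_eq_right (le_of_lt hlt)]
    · rw [if_neg (fun hcon => hlt hcon.2), if_pos hd, min_eq_left (le_of_not_gt hlt)]
  · rw [if_neg (fun hcon => hp hcon.1), if_neg (fun hd => hp (of_decide_eq_true hd))]

-- palB on [j,k] ↔ the slice equals its reverse (indices in range)

lemma pal_cons_concat (a b : Char) (m : List Char) :
    (a :: (m ++ [b]) = (a :: (m ++ [b])).reverse) ↔ (a = b ∧ m = m.reverse) := by
  simp [List.reverse_cons, List.reverse_append]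
  intro h _
  exact h.symm

lemma palB_iff_rev_aux (c : List Char) (d : Nat) : ∀ j k, k - j = d → j ≤ k → k < c.length →
    (palB c j k = true ↔ ((c.drop j).take (k+1-j)) = ((c.drop j).take (k+1-j)).reverse) := by
  induction d using Nat.strong_induction_on with
  | _ d ih =>
    intro j k hd hjk hk
    have hjlen : j < c.length := by omega
    by_cases hd2 : k - j ≤ 2
    · -- small cases: d = 0, 1, 2
      rw [palB, if_pos hd2]
      rw [List.getD_eq_getElem c ' ' hjlen, List.getD_eq_getElem c ' ' hk]
      have hub : d ≤ 2 := by omega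
      interval_cases d
      · have hek : j = k := by omega
        subst hek
        have e1 : j+1-j = 0+1 := by omega
        rw [e1, List.drop_eq_getElem_cons hjlen, List.take_succ_cons, List.take_zero]
        simp
      · have hek : k = j+1 := by omega
        subst hek
        have e1 : j+1+1-j = (0+1)+1 := by omega
        rw [e1, List.drop_eq_getElem_cons hjlen, List.take_succ_cons,
            List.drop_eq_getElem_cons (show j+1 < c.length by omega), List.take_succ_cons,
            List.take_zero]
        simp
        exact fun h => h.symm
      · have hek : k = j+2 := by omega
        subst hek
        have e1 : j+2+1-j = ((0+1)+1)+1 := by omega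
        rw [e1, List.drop_eq_getElem_cons hjlen, List.take_succ_cons,
            List.drop_eq_getElem_cons (show j+1 < c.length by omega), List.take_succ_cons,
            List.drop_eq_getElem_cons (show j+2 < c.length by omega), List.take_succ_cons,
            List.take_zero]
        simp
        exact fun h => h.symm
    · -- d ≥ 3
      have hsub : (c.drop j).take (k+1-j)
          = c.getD j ' ' :: ((c.drop (j+1)).take (k-j-1) ++ [c.getD k ' ']) := by
        rw [List.getD_eq_getElem c ' ' hjlen, List.getD_eq_getElem c ' ' hk]
        rw [List.drop_eq_getElem_cons hjlen]
        have e1 : k+1-j = (k-j)+1 := by omega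
        rw [e1, List.take_succ_cons]
        congr 1
        have e2 : k-j = (k-j-1)+1 := by omega
        rw [e2, List.take_add_one]
        congr 1
        rw [List.getElem?_drop]
        have e4 : j+1+(k-j-1) = k := by omega
        rw [e4, List.getElem?_eq_getElem hk]
        rfl
      have hinner := ih (d-2) (by omega) (j+1) (k-1) (by omega) (by omega) (by omega)
      have e5 : (k-1)+1-(j+1) = k-j-1 := by omega
      rw [e5] at hinner
      rw [palB, if_neg hd2, hsub, pal_cons_concat]
      rw [Bool.and_eq_true, decide_eq_true_eq]
      exact and_congr Iff.rfl hinner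

lemma palB_iff_rev (c : List Char) (j k : Nat) (hjk : j ≤ k) (hk : k < c.length) :
    palB c j k = true ↔ ((c.drop j).take (k+1-j)) = ((c.drop j).take (k+1-j)).reverse :=
  palB_iff_rev_aux c (k - j) j k rfl hjk hk

lemma palB_self (c : List Char) (k : Nat) : palB c k k = true := by
  rw [palB]; simp

lemma Ds_succ (c : List Char) (k : Nat) (hk : k < c.length) :
    Ds c (k+1) = mfold (fun j => palB c j k) (fun j => Ds c j + 1) (Ds c k + 1) k := by
  rw [Ds_succ_mfold]
  apply mfold_congr
  · intro j hj
    have hiff := palB_iff_rev c j k (le_of_lt hj) hk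
    cases hpal : palB c j k
    · exact decide_eq_false (fun hP => by rw [hiff.mpr hP] at hpal; cases hpal)
    · exact decide_eq_true (hiff.mp hpal)
  · intro j hj; rfl

lemma Cs_le (c : List Char) (k : Nat) : Cs c k ≤ (k : Int) := by
  rw [Cs_eq]
  split_ifs with h
  · exact_mod_cast Nat.zero_le k
  · exact mfold_le_init _ _ _ _

lemma Ds_nonneg (c : List Char) (k : Nat) : 0 ≤ Ds c k := by
  induction k using Nat.strong_induction_on with
  | _ k ih =>
    cases k with
    | zero => rw [Ds_zero]
    | succ k =>
      rw [Ds_succ_mfold]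
      rw [le_mfold_iff]
      constructor
      · have := ih k (Nat.lt_succ_self k); omega
      · intro j hj _
        have := ih j (Nat.lt_succ_of_lt hj); omega

-- the core correspondence: dp[k+1] = cortes[k] + 1
lemma Ds_eq_Cs (c : List Char) (k : Nat) (hk : k < c.length) :
    Ds c (k+1) = Cs c k + 1 := by
  induction k using Nat.strong_induction_on with
  | _ k ih =>
    have hD : Ds c (k+1) = mfold (fun j => palB c j k) (fun j => Ds c j + 1) (Ds c k + 1) k :=
      Ds_succ c k hk
    by_cases hp : palB c 0 k = true
    · have hC : Cs c k = 0 := by rw [Cs_eq, if_pos hp]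
      have hub : Ds c (k+1) ≤ 1 := by
        cases k with
        | zero =>
          have h0 : mfold (fun j => palB c j 0) (fun j => Ds c j + 1) (Ds c 0 + 1) 0
              = Ds c 0 + 1 := rfl
          rw [hD, h0, Ds_zero]
          omega
        | succ m =>
          have h1 : mfold (fun j => palB c j (m+1)) (fun j => Ds c j + 1) (Ds c (m+1) + 1) (m+1)
              ≤ Ds c 0 + 1 :=
            mfold_le_g _ _ _ _ (Nat.succ_pos m) hp
          rw [Ds_zero] at h1
          rw [hD]
          omega
      have hlb : 1 ≤ Ds c (k+1) := by
        rw [hD, le_mfold_iff]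
        refine ⟨by have := Ds_nonneg c k; omega, ?_⟩
        intro j hj _
        have h2 : (0:Int) ≤ Ds c j := Ds_nonneg c j
        show (1:Int) ≤ Ds c j + 1
        omega
      omega
    · have hC : Cs c k = mfold (fun j => palB c (j+1) k) (fun j => Cs c j + 1) (k : Int) k := by
        rw [Cs_eq, if_neg hp]
      have hk1 : 1 ≤ k := by
        by_contra hcon
        have : k = 0 := by omega
        subst this
        exact hp (palB_self c 0)
      have ihk : Ds c k = Cs c (k-1) + 1 := by
        have := ih (k-1) (by omega) (by omega)
        rwa [Nat.sub_add_cancel hk1] at this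
      have hCk1 : Cs c k ≤ Cs c (k-1) + 1 := by
        have h3 : mfold (fun j => palB c (j+1) k) (fun j => Cs c j + 1) (k : Int) k
            ≤ Cs c (k-1) + 1 :=
          mfold_le_g _ _ _ _ (j := k-1) (by omega)
            (show palB c (k-1+1) k = true by rw [Nat.sub_add_cancel hk1]; exact palB_self c k)
        rw [hC]
        exact h3
      have hDinit : Ds c (k+1) ≤ Ds c k + 1 := by
        rw [hD]
        exact mfold_le_init _ _ _ _
      have hCle : ((k-1 : Nat) : Int) = (k : Int) - 1 := by omega
      have hCk1' : Cs c (k-1) ≤ ((k-1 : Nat) : Int) := Cs_le c (k-1)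
      apply le_antisymm
      · have h1 : Ds c (k+1) - 1 ≤ mfold (fun j => palB c (j+1) k) (fun j => Cs c j + 1) (k : Int) k := by
          rw [le_mfold_iff]
          constructor
          · omega
          · intro j hj hpj
            show Ds c (k+1) - 1 ≤ Cs c j + 1
            have hDj : Cs c j + 1 = Ds c (j+1) := (ih j hj (by omega)).symm
            by_cases hjk : j + 1 < k
            · have h2 : mfold (fun j => palB c j k) (fun j => Ds c j + 1) (Ds c k + 1) k
                  ≤ Ds c (j+1) + 1 :=
                mfold_le_g _ _ _ _ (j := j+1) hjk hpj
              rw [← hD] at h2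
              omega
            · have hjk' : j + 1 = k := by omega
              have h4 : Ds c (k+1) ≤ Ds c (j+1) + 1 := by rw [hjk']; exact hDinit
              omega
        rw [← hC] at h1
        omega
      · rw [hD, le_mfold_iff]
        constructor
        · omega
        · intro j hj hpj
          show Cs c k + 1 ≤ Ds c j + 1
          have hj1 : 1 ≤ j := by
            by_contra hcon
            have : j = 0 := by omega
            subst this
            exact hp hpj
          have hDj : Ds c j = Cs c (j-1) + 1 := by
            have := ih (j-1) (by omega) (by omega)
            rwa [Nat.sub_add_cancel hj1] at this
          have hCj : Cs c k ≤ Cs c (j-1) + 1 := by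
            have h3 : mfold (fun j => palB c (j+1) k) (fun j => Cs c j + 1) (k : Int) k
                ≤ Cs c (j-1) + 1 :=
              mfold_le_g _ _ _ _ (j := j-1) (by omega)
                (show palB c (j-1+1) k = true by rw [Nat.sub_add_cancel hj1]; exact hpj)
            rw [hC]
            exact h3
          omega

-- ===== port characterizations =====

-- ===== A-side: matrix and cortes characterizations =====

lemma getD_mid (l r : List Int) (v d : Int) : (l ++ v :: r).getD l.length d = v := by
  rw [List.getD_append_right l _ d l.length le_rfl]
  simp

lemma set_mid (l r : List Int) (v w : Int) : (l ++ v :: r).set l.length w = l ++ w :: r := by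
  rw [List.set_append]
  simp


lemma getD_set_self {α : Type} (l : List α) (i : Nat) (v d : α) (h : i < l.length) :
    (l.set i v).getD i d = v := by
  rw [List.getD_eq_getElem?_getD, List.getElem?_set]
  simp [h]

lemma getD_set_ne {α : Type} (l : List α) (i r : Nat) (v d : α) (h : i ≠ r) :
    (l.set i v).getD r d = l.getD r d := by
  rw [List.getD_eq_getElem?_getD, List.getElem?_set, if_neg h, ← List.getD_eq_getElem?_getD]

def MInv (c : List Char) (i0 : Nat) (m : List (List Bool)) : Prop :=
  m.length = c.length ∧ (∀ r, r < c.length → (m.getD r []).length = c.length) ∧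
  ∀ r j, (m.getD r []).getD j false
    = if i0 ≤ r ∧ r ≤ j ∧ j < c.length ∧ r < c.length then palB c r j else false

def RInv (c : List Char) (i jc : Nat) (m : List (List Bool)) : Prop :=
  m.length = c.length ∧ (∀ r, r < c.length → (m.getD r []).length = c.length) ∧
  ∀ r j, (m.getD r []).getD j false
    = if (i+1 ≤ r ∧ r ≤ j ∧ j < c.length ∧ r < c.length) ∨ (r = i ∧ i ≤ j ∧ j < jc)
      then palB c r j else false

lemma rstep (c : List Char) (i jc : Nat) (m : List (List Bool))
    (hin : i < c.length) (hij : i ≤ jc) (hjn : jc < c.length) (hm : RInv c i jc m) :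
    RInv c i (jc+1)
      (if c.getD i ' ' = c.getD jc ' ' then
        (if jc - i ≤ 2 || (m.getD (i+1) []).getD (jc-1) false then
          m.set i ((m.getD i []).set jc true) else m) else m) := by
  obtain ⟨hL, hR, hV⟩ := hm
  have hv23 : ¬(jc - i ≤ 2) → (m.getD (i+1) []).getD (jc-1) false = palB c (i+1) (jc-1) := by
    intro h2
    rw [hV]
    rw [if_pos (Or.inl ⟨le_rfl, by omega, by omega, by omega⟩)]
  have hE : palB c i jc
      = (decide (c.getD i ' ' = c.getD jc ' ')
         && (decide (jc - i ≤ 2) || (m.getD (i+1) []).getD (jc-1) false)) := by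
    rw [palB]
    by_cases h2 : jc - i ≤ 2
    · rw [if_pos h2, decide_eq_true h2]
      simp
    · rw [if_neg h2, hv23 h2, decide_eq_false h2]
      simp
  by_cases hch : c.getD i ' ' = c.getD jc ' '
  · by_cases hor : (decide (jc - i ≤ 2) || (m.getD (i+1) []).getD (jc-1) false) = true
    · rw [if_pos hch, if_pos hor]
      have himl : i < m.length := by omega
      have hrowl : (m.getD i []).length = c.length := hR i hin
      refine ⟨by rw [List.length_set]; exact hL, ?_, ?_⟩
      · intro r hr
        by_cases hri : r = i
        · subst hri
          rw [getD_set_self m r _ [] himl, List.length_set]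
          exact hR r hr
        · rw [getD_set_ne m i r _ [] (fun hc => hri hc.symm)]
          exact hR r hr
      · intro r j
        by_cases hri : r = i
        · subst hri
          rw [getD_set_self m r _ [] himl]
          by_cases hj : j = jc
          · subst hj
            rw [getD_set_self (m.getD r []) j true false (by omega)]
            rw [if_pos (Or.inr ⟨rfl, hij, by omega⟩)]
            rw [hE, hor, decide_eq_true hch]
            rfl
          · rw [getD_set_ne (m.getD r []) jc j true false (fun hc => hj hc.symm)]
            rw [hV]
            split_ifs <;> first | rfl | omega
        · rw [getD_set_ne m i r _ [] (fun hc => hri hc.symm)]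
          rw [hV]
          split_ifs <;> first | rfl | omega
    · rw [if_pos hch, if_neg hor]
      refine ⟨hL, hR, ?_⟩
      intro r j
      rw [hV]
      by_cases hrj : r = i ∧ j = jc
      · obtain ⟨rfl, rfl⟩ := hrj
        rw [if_neg (by omega), if_pos (Or.inr ⟨rfl, hij, by omega⟩)]
        rw [hE, decide_eq_true hch]
        rw [Bool.not_eq_true] at hor
        rw [hor]
        rfl
      · split_ifs <;> first | rfl | omega
  · rw [if_neg hch]
    refine ⟨hL, hR, ?_⟩
    intro r j
    rw [hV]
    by_cases hrj : r = i ∧ j = jc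
    · obtain ⟨rfl, rfl⟩ := hrj
      rw [if_neg (by omega), if_pos (Or.inr ⟨rfl, hij, by omega⟩)]
      rw [hE, decide_eq_false hch]
      rfl
    · split_ifs <;> first | rfl | omega

lemma rowfold (c : List Char) (i : Nat) (hin : i < c.length) : ∀ (d jc : Nat),
    jc + d = c.length → i ≤ jc → ∀ m, RInv c i jc m →
    RInv c i c.length ((List.range' jc d).foldl
      (fun m j => if c.getD i ' ' = c.getD j ' ' then
        (if j - i ≤ 2 || (m.getD (i+1) []).getD (j-1) false then
          m.set i ((m.getD i []).set j true) else m) else m) m) := by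
  intro d
  induction d with
  | zero =>
    intro jc hjc hij m hm
    have he : jc = c.length := by omega
    subst he
    simpa using hm
  | succ d ihd =>
    intro jc hjc hij m hm
    rw [List.range'_succ, List.foldl_cons]
    exact ihd (jc+1) (by omega) (by omega) _ (rstep c i jc m hin hij (by omega) hm)

lemma rinv_of_minv (c : List Char) (i : Nat) (m : List (List Bool))
    (hm : MInv c (i+1) m) : RInv c i i m := by
  obtain ⟨hL, hR, hV⟩ := hm
  refine ⟨hL, hR, ?_⟩
  intro r j
  rw [hV]
  split_ifs <;> first | rfl | omega

lemma minv_of_rinv (c : List Char) (i : Nat) (m : List (List Bool)) (hin : i < c.length)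
    (hm : RInv c i c.length m) : MInv c i m := by
  obtain ⟨hL, hR, hV⟩ := hm
  refine ⟨hL, hR, ?_⟩
  intro r j
  rw [hV]
  split_ifs <;> first | rfl | omega

lemma minit (c : List Char) :
    MInv c c.length (List.replicate c.length (List.replicate c.length false)) := by
  refine ⟨by simp, ?_, ?_⟩
  · intro r hr
    rw [List.getD_replicate _ hr]
    simp
  · intro r j
    have hrow : ∀ L : List Bool, L = List.replicate c.length false ∨ L = [] → L.getD j false = false := by
      rintro L (rfl | rfl)
      · rw [List.getD_eq_getElem?_getD, List.getElem?_replicate]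
        split_ifs <;> rfl
      · rfl
    have houter : (List.replicate c.length (List.replicate c.length false)).getD r []
        = List.replicate c.length false ∨
        (List.replicate c.length (List.replicate c.length false)).getD r [] = [] := by
      by_cases hr : r < c.length
      · exact Or.inl (List.getD_replicate _ hr)
      · refine Or.inr ?_
        rw [List.getD_eq_getElem?_getD, List.getElem?_replicate, if_neg hr]
        rfl
    rw [hrow _ houter]
    split_ifs <;> first | rfl | omega

lemma outerfold (c : List Char) : ∀ i, i ≤ c.length → ∀ m, MInv c i m →
    MInv c 0 (((List.range i).reverse).foldl
      (fun m i => (List.range' i (c.length - i)).foldl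
        (fun m j => if c.getD i ' ' = c.getD j ' ' then
          (if j - i ≤ 2 || (m.getD (i+1) []).getD (j-1) false then
            m.set i ((m.getD i []).set j true) else m) else m) m) m) := by
  intro i
  induction i with
  | zero =>
    intro _ m hm
    simpa using hm
  | succ i ihi =>
    intro hi m hm
    have hrev : (List.range (i+1)).reverse = i :: (List.range i).reverse := by
      rw [List.range_succ]
      simp
    rw [hrev, List.foldl_cons]
    apply ihi (by omega)
    apply minv_of_rinv c i _ (by omega)
    exact rowfold c i (by omega) (c.length - i) i (by omega) le_rfl m (rinv_of_minv c i m hm)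

lemma mfold_succ (p : Nat → Bool) (g : Nat → Int) (init : Int) (k : Nat) :
    mfold p g init (k+1) = if p k then min (mfold p g init k) (g k) else mfold p g init k := by
  rw [mfold, mfold, List.range_succ, List.foldl_append, List.foldl_cons, List.foldl_nil]

lemma CsL_succ (c : List Char) (k : Nat) : CsL c (k+1) = CsL c k ++ [Cs c k] := by
  rw [CsL]
  congr 1
  congr 1
  rw [Cs_eq]
  split_ifs with h
  · rfl
  · exact (mfold_congr _ _ _ _ _ _ (fun j hj => rfl) (fun j hj => by rw [CsL_getD c k j hj])).symm

lemma cinnerFold (c : List Char) (M : List (List Bool)) (hM : MInv c 0 M) (k : Nat)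
    (hk : k < c.length) : ∀ (jn : Nat), jn ≤ k → ∀ (v : Int) (R : List Int),
    (List.range jn).foldl (fun ct j =>
      if (M.getD (j+1) []).getD k false then ct.set k (min (ct.getD k 0) (ct.getD j 0 + 1)) else ct)
      (CsL c k ++ v :: R)
    = CsL c k ++ (mfold (fun j => palB c (j+1) k) (fun j => Cs c j + 1) v jn) :: R := by
  intro jn
  induction jn with
  | zero => intro _ v R; rfl
  | succ jn ih =>
    intro hjn v R
    rw [List.range_succ, List.foldl_append, ih (by omega), List.foldl_cons, List.foldl_nil]
    have hpal : (M.getD (jn+1) []).getD k false = palB c (jn+1) k := by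
      rw [hM.2.2]
      rw [if_pos ⟨by omega, by omega, hk, by omega⟩]
    have hmid := getD_mid (CsL c k) R (mfold (fun j => palB c (j+1) k) (fun j => Cs c j + 1) v jn) 0
    rw [CsL_length] at hmid
    have hgj : (CsL c k ++ (mfold (fun j => palB c (j+1) k) (fun j => Cs c j + 1) v jn) :: R).getD jn 0
        = Cs c jn := by
      rw [List.getD_append _ _ _ jn (by rw [CsL_length]; omega), CsL_getD c k jn (by omega)]
    have hset := set_mid (CsL c k) R (mfold (fun j => palB c (j+1) k) (fun j => Cs c j + 1) v jn)
      (min (mfold (fun j => palB c (j+1) k) (fun j => Cs c j + 1) v jn) (Cs c jn + 1))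
    rw [CsL_length] at hset
    rw [hpal, mfold_succ]
    by_cases hp : palB c (jn+1) k = true
    · rw [if_pos hp, if_pos hp, hmid, hgj, hset]
    · rw [if_neg hp, if_neg hp]

lemma cortesFold (c : List Char) (M : List (List Bool)) (hM : MInv c 0 M) :
    ∀ k, k ≤ c.length →
    (List.range k).foldl (fun ct i =>
      if (M.getD 0 []).getD i false then ct.set i 0
      else (List.range i).foldl (fun ct j =>
        if (M.getD (j+1) []).getD i false then ct.set i (min (ct.getD i 0) (ct.getD j 0 + 1)) else ct)
        (ct.set i (i:Int)))
      (List.replicate c.length (0:Int))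
    = CsL c k ++ List.replicate (c.length - k) 0 := by
  intro k
  induction k with
  | zero => intro _; rfl
  | succ k ih =>
    intro hk1
    rw [List.range_succ, List.foldl_append, ih (by omega), List.foldl_cons, List.foldl_nil]
    have hrep : List.replicate (c.length - k) (0:Int) = 0 :: List.replicate (c.length - (k+1)) 0 := by
      rw [← List.replicate_succ]
      congr 1
      omega
    rw [hrep]
    have hpal0 : (M.getD 0 []).getD k false = palB c 0 k := by
      rw [hM.2.2]
      rw [if_pos ⟨Nat.zero_le 0, Nat.zero_le k, by omega, by omega⟩]
    rw [hpal0]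
    have hset0 := set_mid (CsL c k) (List.replicate (c.length - (k+1)) (0:Int)) 0 (0:Int)
    have hsetk := set_mid (CsL c k) (List.replicate (c.length - (k+1)) (0:Int)) 0 ((k:Nat):Int)
    rw [CsL_length] at hset0 hsetk
    by_cases hp : palB c 0 k = true
    · rw [if_pos hp, hset0, CsL_succ]
      have hc0 : Cs c k = 0 := by rw [Cs_eq, if_pos hp]
      rw [hc0, List.append_assoc]
      rfl
    · rw [if_neg hp, hsetk]
      rw [cinnerFold c M hM k (by omega) k le_rfl ((k:Nat):Int) (List.replicate (c.length - (k+1)) 0)]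
      rw [CsL_succ]
      have hck : Cs c k = mfold (fun j => palB c (j+1) k) (fun j => Cs c j + 1) ((k:Nat):Int) k := by
        rw [Cs_eq, if_neg hp]
      rw [← hck, List.append_assoc]
      rfl

lemma portA_eq (cadena : String) (h : cadena.toList.length ≠ 0) :
    min_palindromos cadena = Cs cadena.toList (cadena.toList.length - 1) + 1 := by
  simp only [min_palindromos]
  rw [if_neg h]
  have hM := outerfold cadena.toList cadena.toList.length le_rfl _ (minit cadena.toList)
  rw [cortesFold cadena.toList _ hM cadena.toList.length le_rfl]
  rw [Nat.sub_self, List.replicate_zero, List.append_nil]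
  rw [CsL_getD cadena.toList _ _ (by omega)]

lemma altFold (c : List Char) (n : Nat) : ∀ k, k ≤ n →
    (List.range' 1 k).foldl
      (fun dp i => dp.set i ((List.range (i-1)).foldl
         (fun mejor j =>
            if ((c.drop j).take (i - j) = ((c.drop j).take (i - j)).reverse) ∧ dp.getD j 0 + 1 < mejor
            then dp.getD j 0 + 1 else mejor) (dp.getD (i-1) 0 + 1)))
      (List.replicate (n+1) (0:Int))
    = DsL c k ++ List.replicate (n-k) 0 := by
  intro k
  induction k with
  | zero =>
    intro _
    show List.replicate (n+1) (0:Int) = DsL c 0 ++ List.replicate (n-0) 0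
    rw [List.replicate_succ]
    rfl
  | succ k ih =>
    intro hk1
    rw [List.range'_1_concat, List.foldl_append, ih (by omega), List.foldl_cons, List.foldl_nil]
    have hi : 1 + k = k + 1 := by omega
    rw [hi]
    have hlen : (DsL c k).length = k + 1 := DsL_length c k
    have hget : ∀ j, j ≤ k → (DsL c k ++ List.replicate (n-k) (0:Int)).getD j 0 = Ds c j := by
      intro j hj
      rw [List.getD_append _ _ _ j (by omega), DsL_getD c k j hj]
    have hmej : (List.range ((k+1)-1)).foldl
         (fun mejor j => if ((c.drop j).take ((k+1) - j) = ((c.drop j).take ((k+1) - j)).reverse)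
              ∧ (DsL c k ++ List.replicate (n-k) (0:Int)).getD j 0 + 1 < mejor
            then (DsL c k ++ List.replicate (n-k) (0:Int)).getD j 0 + 1 else mejor)
         ((DsL c k ++ List.replicate (n-k) (0:Int)).getD ((k+1)-1) 0 + 1)
        = (List.range k).foldl (fun mejor j =>
            if ((c.drop j).take (k+1-j) = ((c.drop j).take (k+1-j)).reverse) ∧ (DsL c k).getD j 0 + 1 < mejor
            then (DsL c k).getD j 0 + 1 else mejor)
          ((DsL c k).getD k 0 + 1) := by
      have e1 : (k+1)-1 = k := by omega
      rw [e1, hget k le_rfl, DsL_getD c k k le_rfl]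
      apply PySem.List.foldl_congr_mem
      intro mejor j hj
      have hj' : j ≤ k := Nat.le_of_lt (List.mem_range.mp hj)
      rw [hget j hj', DsL_getD c k j hj']
    rw [hmej]
    have hrep : List.replicate (n-k) (0:Int) = 0 :: List.replicate (n-k-1) 0 := by
      rw [← List.replicate_succ]
      congr 1
      omega
    rw [hrep]
    have hset := set_mid (DsL c k) (List.replicate (n-k-1) (0:Int)) 0
      ((List.range k).foldl (fun mejor j =>
            if ((c.drop j).take (k+1-j) = ((c.drop j).take (k+1-j)).reverse) ∧ (DsL c k).getD j 0 + 1 < mejor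
            then (DsL c k).getD j 0 + 1 else mejor)
          ((DsL c k).getD k 0 + 1))
    rw [hlen] at hset
    rw [hset]
    show DsL c k ++ _ :: List.replicate (n-k-1) 0 = DsL c (k+1) ++ List.replicate (n-(k+1)) 0
    rw [DsL]
    have e2 : n-(k+1) = n-k-1 := by omega
    rw [e2, List.append_assoc]
    rfl

lemma portB_eq (cadena : String) (h : cadena.toList.length ≠ 0) :
    min_palindromos_alt cadena = Ds cadena.toList cadena.toList.length := by
  simp only [min_palindromos_alt]
  rw [if_neg h]
  rw [altFold cadena.toList cadena.toList.length cadena.toList.length le_rfl]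
  rw [Nat.sub_self]
  show (DsL cadena.toList cadena.toList.length ++ []).getD cadena.toList.length 0 = _
  rw [List.append_nil]
  rfl

-- ===== VERDICT (by name: the statement is the Claim_ definition above) =====
theorem min_palindromos_spec : Claim_equal_min_palindromos := by
  intro cadena _
  unfold Spec_min_palindromos
  by_cases h : cadena.toList.length = 0
  · simp [min_palindromos, min_palindromos_alt, h]
  · rw [portA_eq cadena h, portB_eq cadena h]
    have hn : cadena.toList.length - 1 + 1 = cadena.toList.length := by omega
    rw [← hn, Ds_eq_Cs cadena.toList _ (by omega), Nat.add_sub_cancel]
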